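-- pv_equiv track=rewrite | github.com/lucasagra/codeforces | Codeforces/579 div 3/A.py | clockleft
-- ===== SOURCE A (Python) =====
-- def clockleft(list, start):
--     reps = len(list)-1
--
--     while reps > 0:
--         if list[start % len(list)] != list[(start + 1) % len(list)] -1:
--             return False
--
--         start += 1
--         reps -= 1
--
--     return True
-- ===== SOURCE B (Python) =====
-- def clockleft(list, start):
--     n = len(list)
--     if n == 0:
--         return True
--     base = list[start % n]
--     return all(list[(start + i) % n] == base + i for i in range(n))
-- ===== Notes on version B (the rewrite author's own statement) =====
-- stated objective: alternative
-- what changed: B checks every rotated element against an arithmetic baseline list[start%n]+i in one all() over range(n), instead of A's while loop comparing each element to its immediate successor; equivalent by telescoping.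
import Mathlib
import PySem

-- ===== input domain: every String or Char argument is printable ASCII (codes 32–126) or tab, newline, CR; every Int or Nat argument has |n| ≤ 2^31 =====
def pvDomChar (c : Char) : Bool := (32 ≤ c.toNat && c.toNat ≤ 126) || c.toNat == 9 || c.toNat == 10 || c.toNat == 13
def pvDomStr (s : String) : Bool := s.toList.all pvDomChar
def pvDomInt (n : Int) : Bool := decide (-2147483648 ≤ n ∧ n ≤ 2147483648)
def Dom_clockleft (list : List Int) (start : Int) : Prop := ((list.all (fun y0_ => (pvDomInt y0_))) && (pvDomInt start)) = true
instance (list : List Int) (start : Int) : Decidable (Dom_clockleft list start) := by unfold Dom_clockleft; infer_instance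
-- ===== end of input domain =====

-- B replaces A's successor-difference while loop by one all() check against the arithmetic baseline list[start%n]+i (alternative decomposition, same cost).

-- ===== PORT A =====
-- the while loop runs reps = len(list)-1 times, ported as recursion on that count
def clockleftA_loop (l : List Int) (start : Int) : Nat → Bool
  | 0 => true
  | r + 1 =>
    if (PySem.List.pyGet? l (PySem.Int.mod start (l.length : Int))).getD 0 ≠
       (PySem.List.pyGet? l (PySem.Int.mod (start + 1) (l.length : Int))).getD 0 - 1 then false
    else clockleftA_loop l (start + 1) r

def clockleft (list : List Int) (start : Int) : Bool :=
  clockleftA_loop list start (list.length - 1)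

-- ===== PORT B =====
def clockleft_alt (list : List Int) (start : Int) : Bool :=
  if list.length == 0 then true
  else
    let n : Int := (list.length : Int)
    let base := (PySem.List.pyGet? list (PySem.Int.mod start n)).getD 0
    (List.range list.length).all (fun i =>
      (PySem.List.pyGet? list (PySem.Int.mod (start + (i : Int)) n)).getD 0 == base + (i : Int))

-- ===== PRECONDITION & SPEC =====
def Spec_clockleft (list : List Int) (start : Int) (out : Bool) : Prop := out = clockleft_alt list start
instance (list : List Int) (start : Int) (out : Bool) : Decidable (Spec_clockleft list start out) := by unfold Spec_clockleft; infer_instance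

-- ===== CLAIM (what is proved, stated in full; the proofs are below) =====
def Claim_equal_clockleft : Prop := ∀ (list : List Int) (start : Int), Dom_clockleft list start → Spec_clockleft list start (clockleft list start)

-- ===== LEMMAS AND PROOFS =====

def pvG (l : List Int) (s : Int) : Int :=
  (PySem.List.pyGet? l (PySem.Int.mod s (l.length : Int))).getD 0

theorem loopA_iff (l : List Int) (fuel : Nat) (start : Int) :
    clockleftA_loop l start fuel = true ↔
      ∀ i : Nat, i < fuel → pvG l (start + i) + 1 = pvG l (start + i + 1) := by
  induction fuel generalizing start with
  | zero => simp [clockleftA_loop]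
  | succ r ih =>
    rw [clockleftA_loop]
    split_ifs with h
    · simp only [false_iff]
      intro hall
      have h0 := hall 0 (Nat.succ_pos r)
      simp only [Nat.cast_zero, add_zero] at h0
      exact h (by unfold pvG at h0; omega)
    · rw [ih]
      constructor
      · intro hall i hi
        cases i with
        | zero =>
          simp only [Nat.cast_zero, add_zero]
          unfold pvG; push_neg at h; omega
        | succ j =>
          have := hall j (Nat.lt_of_succ_lt_succ hi)
          push_cast
          push_cast at this
          convert this using 3 <;> ring
      · intro hall i hi
        have := hall (i + 1) (Nat.succ_lt_succ hi)
        push_cast at this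
        push_cast
        convert this using 3 <;> ring

theorem alt_iff (l : List Int) (start : Int) (h : l ≠ []) :
    clockleft_alt l start = true ↔
      ∀ i : Nat, i < l.length → pvG l (start + i) = pvG l start + i := by
  unfold clockleft_alt
  have hlen : ¬ (l.length == 0) = true := by simp [h]
  simp only [hlen, Bool.false_eq_true, if_false, List.all_eq_true, List.mem_range, beq_iff_eq]
  unfold pvG
  constructor
  · intro hall i hi
    rw [hall i hi]
  · intro hall i hi
    rw [hall i hi]

theorem clockleft_agree (l : List Int) (start : Int) :
    clockleft l start = clockleft_alt l start := by
  cases l with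
  | nil => rfl
  | cons x xs =>
    have hne : (x :: xs) ≠ [] := by simp
    rw [Bool.eq_iff_iff]
    unfold clockleft
    rw [loopA_iff, alt_iff _ _ hne]
    simp only [List.length_cons, Nat.add_sub_cancel]
    constructor
    · intro hA i hi
      induction i with
      | zero => simp
      | succ j ihj =>
        have hj : j < xs.length := by omega
        have hstep := hA j (by omega)
        have hprev := ihj (by omega)
        push_cast
        push_cast at hstep hprev
        rw [show start + ((j:Int) + 1) = start + j + 1 by ring]
        omega
    · intro hB i hi
      have h1 := hB i (by omega)
      have h2 := hB (i + 1) (by omega)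
      push_cast at h1 h2
      push_cast
      rw [show start + ((i:Int) + 1) = start + i + 1 by ring] at h2
      omega

-- ===== VERDICT (by name: the statement is the Claim_ definition above) =====
theorem clockleft_spec : Claim_equal_clockleft := by
  intro l start _
  exact clockleft_agree l start
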